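-- pv_equiv track=rewrite | github.com/AmitabhainArunachala/dharma_swarm | dharma_swarm/terminal_bridge.py | _summarize_repo_guidance
-- ===== SOURCE A (Python) =====
-- def _summarize_repo_guidance(text: str) -> str:
--     lines = text.splitlines()
--     kept: list[str] = []
--     current_heading = ""
--     allowed_headings = {
--         "## Behavioral Rules (Always Enforced)",
--         "## File Organization",
--         "## Project Architecture",
--         "## CLI Entry Points",
--         "## Security Rules",
--     }
--     for line in lines:
--         stripped = line.rstrip()
--         if stripped.startswith("## "):
--             current_heading = stripped
--             if current_heading in allowed_headings:
--                 kept.append(stripped)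
--             continue
--         if current_heading not in allowed_headings:
--             continue
--         if stripped.startswith("- ") or stripped.startswith("```") or stripped.startswith("dgc ") or stripped.startswith("uvicorn ") or stripped.startswith("bash "):
--             kept.append(stripped)
--     return "\n".join(line for line in kept if line)
-- ===== SOURCE B (Python) =====
-- ALLOWED_HEADINGS = {
--     "## Behavioral Rules (Always Enforced)",
--     "## File Organization",
--     "## Project Architecture",
--     "## CLI Entry Points",
--     "## Security Rules",
-- }
--
-- KEEP_PREFIXES = ("- ", "```", "dgc ", "uvicorn ", "bash ")
--
--
-- def _summarize_repo_guidance(text: str) -> str: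
--     # Pass 1: partition the (rstripped) lines into sections, one per '## ' heading;
--     # lines before the first heading form an initial section with heading "".
--     sections = []
--     heading = ""
--     body = []
--     for raw in text.splitlines():
--         line = raw.rstrip()
--         if line.startswith("## "):
--             sections.append((heading, body))
--             heading, body = line, []
--         else:
--             body.append(line)
--     sections.append((heading, body))
--     # Pass 2: emit allowed sections (heading + matching body lines).
--     out = []
--     for h, b in sections:
--         if h in ALLOWED_HEADINGS:
--             out.append(h)
--             out.extend(l for l in b if l.startswith(KEEP_PREFIXES))
--     return "\n".join(l for l in out if l)
-- ===== Notes on version B (the rewrite author's own statement) =====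
-- stated objective: alternative
-- what changed: Replaced A's single stateful loop (current-heading flag deciding line by line) with a two-pass decomposition: first partition the lines into (heading, body) sections, then emit each allowed section's heading and matching body lines.
import Mathlib
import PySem

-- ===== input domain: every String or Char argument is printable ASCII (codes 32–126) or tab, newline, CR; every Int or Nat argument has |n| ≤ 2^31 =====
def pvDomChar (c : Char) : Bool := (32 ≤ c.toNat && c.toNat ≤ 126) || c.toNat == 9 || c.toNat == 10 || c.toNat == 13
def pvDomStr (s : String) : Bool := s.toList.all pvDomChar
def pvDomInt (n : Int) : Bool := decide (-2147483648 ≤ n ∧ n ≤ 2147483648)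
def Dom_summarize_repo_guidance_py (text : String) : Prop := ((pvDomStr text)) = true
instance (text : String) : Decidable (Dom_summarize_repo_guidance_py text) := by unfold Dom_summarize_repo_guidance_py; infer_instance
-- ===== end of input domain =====

-- B replaces A's single stateful loop by a two-pass decomposition (partition into sections, then emit allowed ones); objective: alternative, same cost.

-- ===== PORT A =====
def pvAllowed : List String :=
  ["## Behavioral Rules (Always Enforced)",
   "## File Organization",
   "## Project Architecture",
   "## CLI Entry Points",
   "## Security Rules"]

def pvKeepLine (s : String) : Bool :=
  PySem.Str.startswith s "- " || PySem.Str.startswith s "```" || PySem.Str.startswith s "dgc " ||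
    PySem.Str.startswith s "uvicorn " || PySem.Str.startswith s "bash "

def pvALoop (lines : List String) (cur : String) (kept : List String) : List String :=
  match lines with
  | [] => kept
  | l :: rest =>
    let s := PySem.Str.rstrip l
    if PySem.Str.startswith s "## " then
      pvALoop rest s (if pvAllowed.contains s then kept ++ [s] else kept)
    else if !pvAllowed.contains cur then
      pvALoop rest cur kept
    else if pvKeepLine s then
      pvALoop rest cur (kept ++ [s])
    else
      pvALoop rest cur kept

def summarize_repo_guidance_py (text : String) : String :=
  PySem.Str.join "\n" ((pvALoop (PySem.Str.splitlines text) "" []).filter (fun l => l != ""))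

-- ===== PORT B =====
-- pass 1: partition the rstripped lines into sections (heading, body); initial heading ""
def pvBSections (lines : List String) (h : String) (b : List String)
    (secs : List (String × List String)) : List (String × List String) :=
  match lines with
  | [] => secs ++ [(h, b)]
  | l :: rest =>
    let s := PySem.Str.rstrip l
    if PySem.Str.startswith s "## " then
      pvBSections rest s [] (secs ++ [(h, b)])
    else
      pvBSections rest h (b ++ [s]) secs

-- pass 2: emit allowed sections (heading, then body lines with a kept prefix)
def pvBEmit (secs : List (String × List String)) : List String :=
  secs.foldl (fun out hb =>
    if pvAllowed.contains hb.1 then out ++ hb.1 :: hb.2.filter pvKeepLine else out) []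

def summarize_repo_guidance_py_alt (text : String) : String :=
  PySem.Str.join "\n" ((pvBEmit (pvBSections (PySem.Str.splitlines text) "" [] [])).filter (fun l => l != ""))

-- ===== PRECONDITION & SPEC =====
def Spec_summarize_repo_guidance_py (text : String) (out : String) : Prop := out = summarize_repo_guidance_py_alt text
instance (text : String) (out : String) : Decidable (Spec_summarize_repo_guidance_py text out) := by unfold Spec_summarize_repo_guidance_py; infer_instance

-- ===== CLAIM (what is proved, stated in full; the proofs are below) =====
def Claim_equal_summarize_repo_guidance_py : Prop := ∀ (text : String), Dom_summarize_repo_guidance_py text → Spec_summarize_repo_guidance_py text (summarize_repo_guidance_py text)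

-- ===== LEMMAS AND PROOFS =====

def pvEmitSec (hb : String × List String) : List String :=
  if pvAllowed.contains hb.1 then hb.1 :: hb.2.filter pvKeepLine else []

lemma pvBEmit_eq_flatMap (secs : List (String × List String)) :
    pvBEmit secs = secs.flatMap pvEmitSec := by
  have h : ∀ (l : List (String × List String)) (init : List String),
      l.foldl (fun out hb =>
        if pvAllowed.contains hb.1 then out ++ hb.1 :: hb.2.filter pvKeepLine else out) init
      = init ++ l.flatMap pvEmitSec := by
    intro l
    induction l with
    | nil => intro init; simp
    | cons hd tl ih =>
      intro init
      simp only [List.foldl_cons, List.flatMap_cons, ih, pvEmitSec]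
      split <;> simp
  unfold pvBEmit
  exact (h secs []).trans (by simp)

lemma pvKey : ∀ (lines : List String) (cur : String) (b : List String)
    (secs : List (String × List String)) (kept : List String)
    (_ : kept = secs.flatMap pvEmitSec
        ++ (if pvAllowed.contains cur = true then cur :: b.filter pvKeepLine else [])),
    pvALoop lines cur kept = pvBEmit (pvBSections lines cur b secs) := by
  intro lines
  induction lines with
  | nil =>
    intro cur b secs kept hk
    simp only [pvALoop, pvBSections, pvBEmit_eq_flatMap, List.flatMap_append,
      List.flatMap_cons, List.flatMap_nil, List.append_nil, hk, pvEmitSec]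
  | cons l rest ih =>
    intro cur b secs kept hk
    simp only [pvALoop, pvBSections]
    set s := PySem.Str.rstrip l with hs
    by_cases hh : PySem.Str.startswith s "## " = true
    · simp only [hh, if_pos]
      apply ih
      simp only [List.flatMap_append, List.flatMap_cons, List.flatMap_nil,
        List.append_nil, List.filter_nil, hk, pvEmitSec]
      by_cases ha : s ∈ pvAllowed <;> simp [ha]
    · simp only [hh]
      by_cases hc : cur ∈ pvAllowed
      · have hc' : pvAllowed.contains cur = true := by simpa using hc
        simp only [hc', Bool.not_true, Bool.false_eq_true, if_false]
        by_cases hkp : pvKeepLine s = true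
        · simp only [hkp, if_pos]
          apply ih
          simp [hk, hc, List.filter_append, hkp]
        · simp only [hkp, Bool.false_eq_true, if_false]
          apply ih
          simp [hk, hc, List.filter_append, hkp]
      · have hc' : pvAllowed.contains cur = false := by simpa using hc
        simp only [hc', Bool.not_false, if_pos]
        apply ih
        simp [hk, hc]

-- ===== VERDICT (by name: the statement is the Claim_ definition above) =====
theorem summarize_repo_guidance_py_spec : Claim_equal_summarize_repo_guidance_py := by
  intro text _
  unfold Spec_summarize_repo_guidance_py summarize_repo_guidance_py summarize_repo_guidance_py_alt
  rw [pvKey (PySem.Str.splitlines text) "" [] [] [] (by decide)]
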